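-- pv_equiv track=rewrite | github.com/Jl4cTuk/course-4-asm-3in1- | lab7/my/lab.py | sum_shaded_area
-- ===== SOURCE A (Python) =====
-- def sum_shaded_area(matrix):
--     n = len(matrix)
--     total_sum = 0
--
--     for i in range(n // 2 + 1):
--         total_sum += sum(matrix[i][i:n - i])
--
--     for i in range(n // 2 + 1, n):
--         total_sum += sum(matrix[i][n - i - 1:i + 1])
--
--     return total_sum
-- ===== SOURCE B (Python) =====
-- def sum_shaded_area(matrix):
--     n = len(matrix)
--     half = n // 2
--     total = 0
--     for i, row in enumerate(matrix):
--         for j, v in enumerate(row):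
--             if (i <= half and i <= j < n - i) or (i > half and n - 1 - i <= j <= i):
--                 total += v
--     return total
-- ===== Notes on version B (the rewrite author's own statement) =====
-- stated objective: alternative
-- what changed: Replaces A's two row-slice loops (summing matrix[i][i:n-i] and matrix[i][n-i-1:i+1]) by a single full scan over every cell with an explicit membership predicate for the shaded region, keeping only a running total.
import Mathlib
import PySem

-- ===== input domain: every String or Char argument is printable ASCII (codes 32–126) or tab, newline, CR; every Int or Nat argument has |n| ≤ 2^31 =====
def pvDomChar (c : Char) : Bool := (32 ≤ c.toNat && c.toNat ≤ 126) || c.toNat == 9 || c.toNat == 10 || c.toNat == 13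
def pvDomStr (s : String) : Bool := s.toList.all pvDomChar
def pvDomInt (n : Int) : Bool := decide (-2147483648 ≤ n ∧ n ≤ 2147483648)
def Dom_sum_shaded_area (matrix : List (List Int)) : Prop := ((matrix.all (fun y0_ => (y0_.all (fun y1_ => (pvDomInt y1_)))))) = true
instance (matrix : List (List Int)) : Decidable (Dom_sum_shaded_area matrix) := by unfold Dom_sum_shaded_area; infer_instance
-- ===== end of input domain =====

-- B replaces A's two row-slice loops by one full cell scan with a region predicate (alternative decomposition, same cost).

-- ===== PORT A =====
def sum_shaded_area (matrix : List (List Int)) : Int :=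
  let n : Int := matrix.length
  let s1 := (PySem.List.pyRange 0 (PySem.Int.floordiv n 2 + 1) 1).foldl
      (fun acc i => acc + (PySem.List.slice (PySem.List.pyGetD matrix i []) (some i) (some (n - i))).sum) 0
  (PySem.List.pyRange (PySem.Int.floordiv n 2 + 1) n 1).foldl
      (fun acc i => acc + (PySem.List.slice (PySem.List.pyGetD matrix i []) (some (n - i - 1)) (some (i + 1))).sum) s1

-- ===== PORT B =====
def sum_shaded_area_alt (matrix : List (List Int)) : Int :=
  let n : Int := matrix.length
  let half := PySem.Int.floordiv n 2
  (PySem.List.enumerate matrix 0).foldl (fun acc p =>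
    (PySem.List.enumerate p.2 0).foldl (fun acc2 q =>
      if (p.1 ≤ half ∧ p.1 ≤ q.1 ∧ q.1 < n - p.1) ∨ (half < p.1 ∧ n - 1 - p.1 ≤ q.1 ∧ q.1 ≤ p.1)
      then acc2 + q.2 else acc2) acc) 0

-- ===== PRECONDITION & SPEC =====
-- Pre_ excludes only the empty matrix, on which A raises IndexError (its first loop indexes matrix[0]).
def Pre_sum_shaded_area (matrix : List (List Int)) : Prop := matrix ≠ []
instance (matrix : List (List Int)) : Decidable (Pre_sum_shaded_area matrix) := by unfold Pre_sum_shaded_area; infer_instance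
def pvWitness_sum_shaded_area : List (List Int) := [[1]]

def Spec_sum_shaded_area (matrix : List (List Int)) (out : Int) : Prop := out = sum_shaded_area_alt matrix
instance (matrix : List (List Int)) (out : Int) : Decidable (Spec_sum_shaded_area matrix out) := by unfold Spec_sum_shaded_area; infer_instance

-- ===== CLAIM (what is proved, stated in full; the proofs are below) =====
def Claim_equal_sum_shaded_area : Prop := ∀ (matrix : List (List Int)), Dom_sum_shaded_area matrix → Pre_sum_shaded_area matrix → Spec_sum_shaded_area matrix (sum_shaded_area matrix)

-- ===== LEMMAS AND PROOFS =====

-- indexed band-sum over a list equals the sum of the corresponding drop/take window (Nat world)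
lemma natcore (row : List Int) : ∀ (a b : Nat),
    ((List.range row.length).map (fun k => if a ≤ k ∧ k < b then row.getD k 0 else 0)).sum
      = ((row.drop a).take (b - a)).sum := by
  induction row with
  | nil => intro a b; simp
  | cons x xs ih =>
    intro a b
    rw [List.length_cons, List.range_succ_eq_map, List.map_cons, List.map_map, List.sum_cons]
    have hshift :
        ((List.range xs.length).map
          ((fun k => if a ≤ k ∧ k < b then (x :: xs).getD k 0 else 0) ∘ Nat.succ)).sum
        = ((xs.drop (a - 1)).take ((b - 1) - (a - 1))).sum := by
      rw [← ih (a - 1) (b - 1)]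
      apply congrArg List.sum
      apply List.map_congr_left
      intro k _
      have hiff : (a ≤ k + 1 ∧ k + 1 < b) ↔ (a - 1 ≤ k ∧ k < b - 1) := by omega
      simp [Function.comp, hiff]
    rw [hshift]
    match a, b with
    | 0, 0 => simp
    | 0, Nat.succ c => simp
    | Nat.succ d, b =>
      simp only [Nat.succ_sub_one, List.drop_succ_cons]
      have h1 : ¬ (d + 1 ≤ 0 ∧ 0 < b) := by omega
      have h2 : b - 1 - d = b - (d + 1) := by omega
      simp [h2]

-- band-sum over enumerate equals a python slice sum (nonnegative bounds)
lemma intcore (row : List Int) (a b : Int) (ha : 0 ≤ a) (hb : 0 ≤ b) :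
    ((PySem.List.enumerate row 0).map (fun q => if a ≤ q.1 ∧ q.1 < b then q.2 else 0)).sum
      = (PySem.List.slice row (some a) (some b)).sum := by
  rw [PySem.List.slice_toNat row ha hb, PySem.List.enumerate_eq_map_pyRange (d := 0),
    PySem.List.pyRange_one, List.map_map, List.map_map, ← natcore row a.toNat b.toNat]
  apply congrArg List.sum
  apply List.map_congr_left
  intro k _
  have hiff : (a ≤ (k : Int) ∧ (k : Int) < b) ↔ (a.toNat ≤ k ∧ k < b.toNat) := by omega
  simp [Function.comp, hiff]

-- B's inner loop as accumulator-plus-band-sum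
lemma innerB (P : Int → Prop) [DecidablePred P] (row : List Int) (acc : Int) :
    (PySem.List.enumerate row 0).foldl
        (fun acc2 (q : Int × Int) => if P q.1 then acc2 + q.2 else acc2) acc
      = acc + ((PySem.List.enumerate row 0).map (fun q => if P q.1 then q.2 else 0)).sum := by
  have hf : (fun (acc2 : Int) (q : Int × Int) => if P q.1 then acc2 + q.2 else acc2)
      = (fun acc2 q => acc2 + (if P q.1 then q.2 else 0)) := by
    funext acc2 q; split <;> simp
  rw [hf, PySem.List.foldl_add]

-- ===== VERDICT (by name: the statement is the Claim_ definition above) =====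
theorem sum_shaded_area_spec : Claim_equal_sum_shaded_area := by
  intro matrix _ hpre
  unfold Spec_sum_shaded_area
  have hn1 : 1 ≤ (matrix.length : Int) := by
    have : matrix.length ≠ 0 := fun h => hpre (List.eq_nil_of_length_eq_zero h)
    omega
  simp only [sum_shaded_area, sum_shaded_area_alt]
  have hfd : PySem.Int.floordiv (matrix.length : Int) 2 = (matrix.length : Int) / 2 :=
    PySem.Int.floordiv_eq_ediv_of_pos (by omega)
  rw [hfd]
  set n : Int := (matrix.length : Int) with hn
  set h : Int := n / 2 with hh
  have hhb : 0 ≤ h ∧ h < n := by constructor <;> omega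
  rw [PySem.List.foldl_add, PySem.List.foldl_add]
  rw [PySem.List.enumerate_eq_map_pyRange matrix [], List.foldl_map]
  dsimp only
  rw [show PySem.List.len matrix = n from by simp [hn]]
  rw [PySem.List.pyRange_one_append 0 (h + 1) n (by omega) (by omega), List.foldl_append]
  have key1 : ∀ i ∈ PySem.List.pyRange 0 (h + 1), ∀ acc : Int,
      (PySem.List.enumerate (PySem.List.pyGetD matrix i [])).foldl
        (fun acc2 q => if i ≤ h ∧ i ≤ q.1 ∧ q.1 < n - i ∨ h < i ∧ n - 1 - i ≤ q.1 ∧ q.1 ≤ i then acc2 + q.2 else acc2) acc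
      = acc + (PySem.List.slice (PySem.List.pyGetD matrix i []) (some i) (some (n - i))).sum := by
    intro i hi acc
    have hi' := PySem.List.mem_pyRange_one.mp hi
    rw [innerB (fun j => i ≤ h ∧ i ≤ j ∧ j < n - i ∨ h < i ∧ n - 1 - i ≤ j ∧ j ≤ i)]
    congr 1
    rw [← intcore _ i (n - i) (by omega) (by omega)]
    apply congrArg List.sum
    apply List.map_congr_left
    intro q _
    split_ifs <;> first | rfl | omega
  have key2 : ∀ i ∈ PySem.List.pyRange (h + 1) n, ∀ acc : Int,
      (PySem.List.enumerate (PySem.List.pyGetD matrix i [])).foldl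
        (fun acc2 q => if i ≤ h ∧ i ≤ q.1 ∧ q.1 < n - i ∨ h < i ∧ n - 1 - i ≤ q.1 ∧ q.1 ≤ i then acc2 + q.2 else acc2) acc
      = acc + (PySem.List.slice (PySem.List.pyGetD matrix i []) (some (n - i - 1)) (some (i + 1))).sum := by
    intro i hi acc
    have hi' := PySem.List.mem_pyRange_one.mp hi
    rw [innerB (fun j => i ≤ h ∧ i ≤ j ∧ j < n - i ∨ h < i ∧ n - 1 - i ≤ j ∧ j ≤ i)]
    congr 1
    rw [← intcore _ (n - i - 1) (i + 1) (by omega) (by omega)]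
    apply congrArg List.sum
    apply List.map_congr_left
    intro q _
    split_ifs <;> first | rfl | omega
  rw [PySem.List.foldl_congr_mem' (PySem.List.pyRange 0 (h + 1))
        (fun acc i => List.foldl
          (fun acc2 q => if i ≤ h ∧ i ≤ q.1 ∧ q.1 < n - i ∨ h < i ∧ n - 1 - i ≤ q.1 ∧ q.1 ≤ i then acc2 + q.2 else acc2)
          acc (PySem.List.enumerate (PySem.List.pyGetD matrix i [])))
        (fun acc i => acc + (PySem.List.slice (PySem.List.pyGetD matrix i []) (some i) (some (n - i))).sum)
        0 key1]
  rw [PySem.List.foldl_congr_mem' (PySem.List.pyRange (h + 1) n)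
        (fun acc i => List.foldl
          (fun acc2 q => if i ≤ h ∧ i ≤ q.1 ∧ q.1 < n - i ∨ h < i ∧ n - 1 - i ≤ q.1 ∧ q.1 ≤ i then acc2 + q.2 else acc2)
          acc (PySem.List.enumerate (PySem.List.pyGetD matrix i [])))
        (fun acc i => acc + (PySem.List.slice (PySem.List.pyGetD matrix i []) (some (n - i - 1)) (some (i + 1))).sum)
        _ key2]
  rw [PySem.List.foldl_add, PySem.List.foldl_add]
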